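-- pv_equiv track=rewrite | github.com/YoanGab/Morpion4 | Morpion.py | get_smallest_board
-- ===== SOURCE A (Python) =====
-- EMPTY = " "
--
-- def get_smallest_board(board):
--     size = len(board)
--     min_index_line = size
--     max_index_line = 0
--     min_index_column = size
--     max_index_column = 0
--     for i in range(size):
--         for j in range(size):
--             if board[i][j] != EMPTY:
--                 min_index_line = min(i, min_index_line)
--                 max_index_line = max(i, max_index_line)
--                 min_index_column = min(j, min_index_column)
--                 max_index_column = max(j, max_index_column)
--
--     min_index_line -= 2
--     max_index_line += 2
--     min_index_column -= 2
--     max_index_column += 2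
--
--     if min_index_line < 0:
--         min_index_line = 0
--     if max_index_line > size:
--         max_index_line = size
--     if min_index_column < 0:
--         min_index_column = 0
--     if max_index_column > size:
--         max_index_column = size
--     min_index = min(min_index_column, min_index_line)
--     max_index = max(max_index_column, max_index_line)
--
--     return [[board[i][j] for j in range(int(min_index), int(max_index))] for i in range(int(min_index), int(max_index))], min_index
-- ===== SOURCE B (Python) =====
-- EMPTY = " "
--
-- def get_smallest_board(board):
--     size = len(board)
--
--     def row_occupied(i):
--         return any(board[i][j] != EMPTY for j in range(size))
--
--     def col_occupied(j):
--         return any(board[i][j] != EMPTY for i in range(size))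
--
--     min_line = next((i for i in range(size) if row_occupied(i)), size)
--     max_line = next((i for i in reversed(range(size)) if row_occupied(i)), 0)
--     min_col = next((j for j in range(size) if col_occupied(j)), size)
--     max_col = next((j for j in reversed(range(size)) if col_occupied(j)), 0)
--
--     lo = min(max(min_col - 2, 0), max(min_line - 2, 0))
--     hi = max(min(max_col + 2, size), min(max_line + 2, size))
--     return [row[lo:hi] for row in board[lo:hi]], lo
-- ===== Notes on version B (the rewrite author's own statement) =====
-- stated objective: alternative
-- what changed: Instead of A's full-grid scan maintaining four running extremes, B finds each bounding edge independently with an early-exit search: the first/last occupied row and column via next() over forward and reversed index ranges with short-circuiting any() line tests, then clamps with min/max and crops by list slicing instead of A's index-comprehension copy.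
import Mathlib
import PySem

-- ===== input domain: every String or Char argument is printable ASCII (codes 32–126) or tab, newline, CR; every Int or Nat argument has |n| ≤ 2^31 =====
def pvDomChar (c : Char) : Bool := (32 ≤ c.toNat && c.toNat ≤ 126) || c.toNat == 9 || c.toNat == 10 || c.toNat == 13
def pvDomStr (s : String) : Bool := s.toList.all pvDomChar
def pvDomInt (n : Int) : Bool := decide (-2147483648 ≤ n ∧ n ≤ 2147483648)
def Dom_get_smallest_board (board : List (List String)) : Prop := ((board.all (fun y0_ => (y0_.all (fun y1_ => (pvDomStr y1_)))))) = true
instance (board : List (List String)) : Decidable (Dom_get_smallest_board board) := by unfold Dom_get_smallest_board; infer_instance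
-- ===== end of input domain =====

-- B finds each bounding edge independently by an early-exit search from that edge (first/last
-- occupied row/column) and crops by slicing, instead of A's full-grid scan with running extremes
-- (objective: alternative algorithm, same asymptotic cost).

-- ===== PORT A =====
-- the nested for-loops computing (min_index_line, max_index_line, min_index_column, max_index_column)
def pvAState (board : List (List String)) : Int × Int × Int × Int :=
  let size : Int := board.length
  (PySem.List.pyRange 0 size).foldl (fun s i =>
    (PySem.List.pyRange 0 size).foldl (fun t j =>
      if PySem.List.pyGetD (PySem.List.pyGetD board i []) j " " ≠ " " then
        (min i t.1, max i t.2.1, min j t.2.2.1, max j t.2.2.2)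
      else t) s) (size, 0, size, 0)

def get_smallest_board (board : List (List String)) : List (List String) × Int :=
  let size : Int := board.length
  let st := pvAState board
  let min_index_line := st.1 - 2
  let max_index_line := st.2.1 + 2
  let min_index_column := st.2.2.1 - 2
  let max_index_column := st.2.2.2 + 2
  let min_index_line := if min_index_line < 0 then 0 else min_index_line
  let max_index_line := if max_index_line > size then size else max_index_line
  let min_index_column := if min_index_column < 0 then 0 else min_index_column
  let max_index_column := if max_index_column > size then size else max_index_column
  let min_index := min min_index_column min_index_line
  let max_index := max max_index_column max_index_line
  ((PySem.List.pyRange min_index max_index).map (fun i =>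
      (PySem.List.pyRange min_index max_index).map (fun j =>
        PySem.List.pyGetD (PySem.List.pyGetD board i []) j " ")),
   min_index)

-- ===== PORT B =====
-- row_occupied(i) = any(board[i][j] != EMPTY for j in range(size))
def pvRowOcc (board : List (List String)) (i : Int) : Bool :=
  (PySem.List.pyRange 0 board.length).any (fun j =>
    PySem.List.pyGetD (PySem.List.pyGetD board i []) j " " ≠ " ")

-- col_occupied(j) = any(board[i][j] != EMPTY for i in range(size))
def pvColOcc (board : List (List String)) (j : Int) : Bool :=
  (PySem.List.pyRange 0 board.length).any (fun i =>
    PySem.List.pyGetD (PySem.List.pyGetD board i []) j " " ≠ " ")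

def get_smallest_board_alt (board : List (List String)) : List (List String) × Int :=
  let size : Int := board.length
  -- next((i for i in range(size) if row_occupied(i)), size)  etc.
  let min_line := ((PySem.List.pyRange 0 size).find? (pvRowOcc board)).getD size
  let max_line := ((PySem.List.pyRange 0 size).reverse.find? (pvRowOcc board)).getD 0
  let min_col := ((PySem.List.pyRange 0 size).find? (pvColOcc board)).getD size
  let max_col := ((PySem.List.pyRange 0 size).reverse.find? (pvColOcc board)).getD 0
  let lo := min (max (min_col - 2) 0) (max (min_line - 2) 0)
  let hi := max (min (max_col + 2) size) (min (max_line + 2) size)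
  ((PySem.List.slice board (some lo) (some hi)).map (fun row =>
      PySem.List.slice row (some lo) (some hi)),
   lo)

-- ===== PRECONDITION & SPEC =====
-- Pre_ excludes ragged boards in which some row is shorter than the number of rows: there A's
-- board[i][j] raises IndexError (it never returns), so nothing is claimed about those inputs.
def Pre_get_smallest_board (board : List (List String)) : Prop :=
  ∀ row ∈ board, board.length ≤ row.length
instance (board : List (List String)) : Decidable (Pre_get_smallest_board board) := by
  unfold Pre_get_smallest_board; infer_instance

def pvWitness_get_smallest_board : List (List String) := [["X", " "], [" ", "O"]]

def Spec_get_smallest_board (board : List (List String)) (out : List (List String) × Int) : Prop := out = get_smallest_board_alt board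
instance (board : List (List String)) (out : List (List String) × Int) : Decidable (Spec_get_smallest_board board out) := by unfold Spec_get_smallest_board; infer_instance

-- ===== CLAIM (what is proved, stated in full; the proofs are below) =====
def Claim_equal_get_smallest_board : Prop := ∀ (board : List (List String)), Dom_get_smallest_board board → Pre_get_smallest_board board → Spec_get_smallest_board board (get_smallest_board board)

-- ===== LEMMAS AND PROOFS =====

-- the cell read both ports perform
def pvGet (board : List (List String)) (i j : Int) : String :=
  PySem.List.pyGetD (PySem.List.pyGetD board i []) j " "

-- the occupied coordinates, in A's traversal order (proof helper)
def pvIdx (board : List (List String)) : List (Int × Int) :=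
  (PySem.List.pyRange 0 board.length).flatMap (fun i =>
    (PySem.List.pyRange 0 board.length).filterMap (fun j =>
      if pvGet board i j ≠ " " then some (i, j) else none))

-- A's conditional update of the four running extremes
def pvUpd (t : Int × Int × Int × Int) (q : Int × Int) : Int × Int × Int × Int :=
  (min q.1 t.1, max q.1 t.2.1, min q.2 t.2.2.1, max q.2 t.2.2.2)

theorem pv_stateA_eq_fold (board : List (List String)) :
    pvAState board = (pvIdx board).foldl pvUpd ((board.length : Int), 0, (board.length : Int), 0) := by
  rw [pvIdx, List.foldl_flatMap]
  unfold pvAState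
  apply PySem.List.foldl_congr_mem
  intro acc i _
  rw [List.foldl_filterMap]
  apply PySem.List.foldl_congr_mem
  intro t j _
  by_cases hc : pvGet board i j ≠ " "
  · simp only [pvGet] at hc
    simp only [pvGet, if_pos hc, pvUpd]
  · simp only [pvGet] at hc
    simp only [pvGet, if_neg hc]

theorem pv_fold_upd (l : List (Int × Int)) :
    ∀ (a b c d : Int),
      l.foldl pvUpd (a, b, c, d)
        = ((l.map (fun p => p.1)).foldl min a, (l.map (fun p => p.1)).foldl max b,
           (l.map (fun p => p.2)).foldl min c, (l.map (fun p => p.2)).foldl max d) := by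
  induction l with
  | nil => intro a b c d; simp
  | cons p t ih =>
    intro a b c d
    simp only [List.foldl_cons, List.map_cons, pvUpd]
    rw [ih, min_comm p.1 a, max_comm p.1 b, min_comm p.2 c, max_comm p.2 d]

theorem pv_mem_idx (board : List (List String)) (q : Int × Int) :
    q ∈ pvIdx board ↔
      (0 ≤ q.1 ∧ q.1 < (board.length : Int) ∧ 0 ≤ q.2 ∧ q.2 < (board.length : Int)
        ∧ pvGet board q.1 q.2 ≠ " ") := by
  constructor
  · intro h
    simp only [pvIdx, List.mem_flatMap, List.mem_filterMap] at h
    obtain ⟨i, hi, j, hj, heq⟩ := h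
    by_cases hc : pvGet board i j ≠ " "
    · rw [if_pos hc] at heq
      injection heq with heq
      subst heq
      obtain ⟨hi1, hi2⟩ := PySem.List.mem_pyRange_one.1 hi
      obtain ⟨hj1, hj2⟩ := PySem.List.mem_pyRange_one.1 hj
      exact ⟨hi1, hi2, hj1, hj2, hc⟩
    · rw [if_neg hc] at heq
      exact absurd heq (by simp)
  · rintro ⟨h1, h2, h3, h4, h5⟩
    simp only [pvIdx, List.mem_flatMap, List.mem_filterMap]
    exact ⟨q.1, PySem.List.mem_pyRange_one.2 ⟨h1, h2⟩,
           q.2, PySem.List.mem_pyRange_one.2 ⟨h3, h4⟩, by rw [if_pos h5]⟩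

theorem pv_rowOcc_iff (board : List (List String)) (i : Int) :
    pvRowOcc board i = true ↔ ∃ j, 0 ≤ j ∧ j < (board.length : Int) ∧ pvGet board i j ≠ " " := by
  simp only [pvRowOcc, List.any_eq_true, decide_eq_true_eq, pvGet]
  constructor
  · rintro ⟨j, hj, hc⟩
    obtain ⟨h1, h2⟩ := PySem.List.mem_pyRange_one.1 hj
    exact ⟨j, h1, h2, hc⟩
  · rintro ⟨j, h1, h2, hc⟩
    exact ⟨j, PySem.List.mem_pyRange_one.2 ⟨h1, h2⟩, hc⟩

theorem pv_colOcc_iff (board : List (List String)) (j : Int) :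
    pvColOcc board j = true ↔ ∃ i, 0 ≤ i ∧ i < (board.length : Int) ∧ pvGet board i j ≠ " " := by
  simp only [pvColOcc, List.any_eq_true, decide_eq_true_eq, pvGet]
  constructor
  · rintro ⟨i, hi, hc⟩
    obtain ⟨h1, h2⟩ := PySem.List.mem_pyRange_one.1 hi
    exact ⟨i, h1, h2, hc⟩
  · rintro ⟨i, h1, h2, hc⟩
    exact ⟨i, PySem.List.mem_pyRange_one.2 ⟨h1, h2⟩, hc⟩

-- i occurs among the first components of pvIdx iff row i is occupied (and in range)
theorem pv_mem_fst (board : List (List String)) (i : Int) :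
    i ∈ (pvIdx board).map (fun p => p.1) ↔
      (0 ≤ i ∧ i < (board.length : Int) ∧ pvRowOcc board i = true) := by
  rw [pv_rowOcc_iff]
  simp only [List.mem_map]
  constructor
  · rintro ⟨q, hq, rfl⟩
    obtain ⟨h1, h2, h3, h4, h5⟩ := (pv_mem_idx board q).1 hq
    exact ⟨h1, h2, q.2, h3, h4, h5⟩
  · rintro ⟨h1, h2, j, h3, h4, h5⟩
    exact ⟨(i, j), (pv_mem_idx board (i, j)).2 ⟨h1, h2, h3, h4, h5⟩, rfl⟩

theorem pv_mem_snd (board : List (List String)) (j : Int) :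
    j ∈ (pvIdx board).map (fun p => p.2) ↔
      (0 ≤ j ∧ j < (board.length : Int) ∧ pvColOcc board j = true) := by
  rw [pv_colOcc_iff]
  simp only [List.mem_map]
  constructor
  · rintro ⟨q, hq, rfl⟩
    obtain ⟨h1, h2, h3, h4, h5⟩ := (pv_mem_idx board q).1 hq
    exact ⟨h3, h4, q.1, h1, h2, h5⟩
  · rintro ⟨h1, h2, i, h3, h4, h5⟩
    exact ⟨(i, j), (pv_mem_idx board (i, j)).2 ⟨h3, h4, h1, h2, h5⟩, rfl⟩

-- foldl min/max basic facts
theorem pv_foldl_min_le (l : List Int) : ∀ (s : Int), l.foldl min s ≤ s ∧ ∀ x ∈ l, l.foldl min s ≤ x := by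
  induction l with
  | nil => intro s; simp
  | cons y t ih =>
    intro s
    obtain ⟨h1, h2⟩ := ih (min s y)
    refine ⟨le_trans h1 (min_le_left _ _), ?_⟩
    intro x hx
    rcases List.mem_cons.1 hx with rfl | hx
    · exact le_trans h1 (min_le_right _ _)
    · exact h2 x hx

theorem pv_le_foldl_max (l : List Int) : ∀ (s : Int), s ≤ l.foldl max s ∧ ∀ x ∈ l, x ≤ l.foldl max s := by
  induction l with
  | nil => intro s; simp
  | cons y t ih =>
    intro s
    obtain ⟨h1, h2⟩ := ih (max s y)
    refine ⟨le_trans (le_max_left _ _) h1, ?_⟩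
    intro x hx
    rcases List.mem_cons.1 hx with rfl | hx
    · exact le_trans (le_max_right _ _) h1
    · exact h2 x hx

theorem pv_foldl_min_mem (l : List Int) : ∀ (s : Int), l.foldl min s = s ∨ l.foldl min s ∈ l := by
  induction l with
  | nil => intro s; simp
  | cons y t ih =>
    intro s
    simp only [List.foldl_cons]
    rcases ih (min s y) with h | h
    · rcases min_cases s y with ⟨he, _⟩ | ⟨he, _⟩
      · exact Or.inl (by rw [h, he])
      · exact Or.inr (by rw [h, he]; exact List.mem_cons_self)
    · exact Or.inr (List.mem_cons_of_mem _ h)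

theorem pv_foldl_max_mem (l : List Int) : ∀ (s : Int), l.foldl max s = s ∨ l.foldl max s ∈ l := by
  induction l with
  | nil => intro s; simp
  | cons y t ih =>
    intro s
    simp only [List.foldl_cons]
    rcases ih (max s y) with h | h
    · rcases max_cases s y with ⟨he, _⟩ | ⟨he, _⟩
      · exact Or.inl (by rw [h, he])
      · exact Or.inr (by rw [h, he]; exact List.mem_cons_self)
    · exact Or.inr (List.mem_cons_of_mem _ h)

-- find? on a strictly sorted list returns the least satisfying element
theorem pv_find?_eq_of_least (l : List Int) (p : Int → Bool) (i : Int) :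
    l.Pairwise (· < ·) → i ∈ l → p i = true → (∀ x ∈ l, p x = true → i ≤ x) →
    l.find? p = some i := by
  induction l with
  | nil => intro _ h; simp at h
  | cons y t ih =>
    intro hs hm hp hleast
    rcases List.mem_cons.1 hm with rfl | hm
    · rw [List.find?_cons_of_pos hp]
    · have hy : y < i := (List.pairwise_cons.1 hs).1 i hm
      have hpy : p y = false := by
        by_contra hb
        have := hleast y List.mem_cons_self (by simpa using hb)
        omega
      rw [List.find?_cons_of_neg (by simp [hpy])]
      exact ih (List.pairwise_cons.1 hs).2 hm hp (fun x hx => hleast x (List.mem_cons_of_mem _ hx))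

theorem pv_find?_eq_of_greatest (l : List Int) (p : Int → Bool) (i : Int) :
    l.Pairwise (· < ·) → i ∈ l → p i = true → (∀ x ∈ l, p x = true → x ≤ i) →
    l.reverse.find? p = some i := by
  intro hs hm hp hgreat
  induction l using List.reverseRecOn with
  | nil => simp at hm
  | append_singleton t y ih =>
    rw [List.reverse_append, List.reverse_singleton, List.singleton_append]
    rcases List.mem_append.1 hm with hm | hm
    · have hy : i < y := by
        have := List.pairwise_append.1 hs
        exact this.2.2 i hm y List.mem_cons_self
      have hpy : p y = false := by
        by_contra hb
        have := hgreat y (List.mem_append.2 (Or.inr List.mem_cons_self)) (by simpa using hb)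
        omega
      rw [List.find?_cons_of_neg (by simp [hpy])]
      exact ih (List.pairwise_append.1 hs).1 hm
        (fun x hx => hgreat x (List.mem_append.2 (Or.inl hx)))
    · simp only [List.mem_singleton] at hm
      subst hm
      rw [List.find?_cons_of_pos hp]

theorem pv_find?_none_of_empty (l : List Int) (p : Int → Bool) (h : ∀ x ∈ l, p x = false) :
    l.find? p = none := by
  rw [List.find?_eq_none]
  intro x hx
  simp [h x hx]

-- boundary search = fold extremum, given a characterisation of the fold's list
theorem pv_minsearch (l : List Int) (p : Int → Bool) (n : Int)
    (hmem : ∀ x, x ∈ l ↔ (0 ≤ x ∧ x < n ∧ p x = true)) :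
    ((PySem.List.pyRange 0 n).find? p).getD n = l.foldl min n := by
  cases l with
  | nil =>
    rw [pv_find?_none_of_empty]
    · simp
    · intro x hx
      obtain ⟨h1, h2⟩ := PySem.List.mem_pyRange_one.1 hx
      by_contra hb
      have : x ∈ ([] : List Int) := (hmem x).2 ⟨h1, h2, by simpa using hb⟩
      simp at this
  | cons y t =>
    set l := y :: t with hl
    set m := l.foldl min n with hm
    have hlem := pv_foldl_min_le l n
    have hmmem : m ∈ l := by
      rcases pv_foldl_min_mem l n with h | h
      · have hy : y ∈ l := List.mem_cons_self
        obtain ⟨-, hy2, -⟩ := (hmem y).1 hy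
        have := hlem.2 y hy
        omega
      · exact h
    obtain ⟨hm1, hm2, hm3⟩ := (hmem m).1 hmmem
    rw [pv_find?_eq_of_least (PySem.List.pyRange 0 n) p m
        (PySem.List.pairwise_lt_pyRange_one 0 n)
        (PySem.List.mem_pyRange_one.2 ⟨hm1, hm2⟩) hm3 ?_]
    · rfl
    · intro x hx hpx
      obtain ⟨h1, h2⟩ := PySem.List.mem_pyRange_one.1 hx
      exact hlem.2 x ((hmem x).2 ⟨h1, h2, hpx⟩)

theorem pv_maxsearch (l : List Int) (p : Int → Bool) (n : Int)
    (hmem : ∀ x, x ∈ l ↔ (0 ≤ x ∧ x < n ∧ p x = true)) :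
    (((PySem.List.pyRange 0 n).reverse).find? p).getD 0 = l.foldl max 0 := by
  cases l with
  | nil =>
    rw [pv_find?_none_of_empty]
    · simp
    · intro x hx
      obtain ⟨h1, h2⟩ := PySem.List.mem_pyRange_one.1 (List.mem_reverse.1 hx)
      by_contra hb
      have : x ∈ ([] : List Int) := (hmem x).2 ⟨h1, h2, by simpa using hb⟩
      simp at this
  | cons y t =>
    set l := y :: t with hl
    set m := l.foldl max 0 with hm
    have hlem := pv_le_foldl_max l 0
    have hmmem : m ∈ l := by
      rcases pv_foldl_max_mem l 0 with h | h
      · have hy : y ∈ l := List.mem_cons_self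
        obtain ⟨hy1, -, -⟩ := (hmem y).1 hy
        have h2 := hlem.2 y hy
        have : y = m := by omega
        rwa [this] at hy
      · exact h
    obtain ⟨hm1, hm2, hm3⟩ := (hmem m).1 hmmem
    rw [pv_find?_eq_of_greatest (PySem.List.pyRange 0 n) p m
        (PySem.List.pairwise_lt_pyRange_one 0 n)
        (PySem.List.mem_pyRange_one.2 ⟨hm1, hm2⟩) hm3 ?_]
    · rfl
    · intro x hx hpx
      obtain ⟨h1, h2⟩ := PySem.List.mem_pyRange_one.1 hx
      exact hlem.2 x ((hmem x).2 ⟨h1, h2, hpx⟩)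

-- the four boundary searches of B compute exactly the four fold components of A's state
theorem pv_state_eq (board : List (List String)) :
    pvAState board
      = (((PySem.List.pyRange 0 (board.length : Int)).find? (pvRowOcc board)).getD (board.length : Int),
         ((PySem.List.pyRange 0 (board.length : Int)).reverse.find? (pvRowOcc board)).getD 0,
         ((PySem.List.pyRange 0 (board.length : Int)).find? (pvColOcc board)).getD (board.length : Int),
         ((PySem.List.pyRange 0 (board.length : Int)).reverse.find? (pvColOcc board)).getD 0) := by
  rw [pv_stateA_eq_fold, pv_fold_upd,
      pv_minsearch ((pvIdx board).map (fun p => p.1)) (pvRowOcc board) (board.length : Int)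
        (pv_mem_fst board),
      pv_maxsearch ((pvIdx board).map (fun p => p.1)) (pvRowOcc board) (board.length : Int)
        (pv_mem_fst board),
      pv_minsearch ((pvIdx board).map (fun p => p.2)) (pvColOcc board) (board.length : Int)
        (pv_mem_snd board),
      pv_maxsearch ((pvIdx board).map (fun p => p.2)) (pvColOcc board) (board.length : Int)
        (pv_mem_snd board)]

-- [xs[j] for j in range(a, b)] is the slice xs[a:b] when 0 ≤ a, 0 ≤ b ≤ len(xs)
theorem pv_map_range_slice {α : Type} (xs : List α) (d : α) (a b : Int)
    (h0 : 0 ≤ a) (hb0 : 0 ≤ b) (hb : b ≤ (xs.length : Int)) :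
    (PySem.List.pyRange a b).map (fun j => PySem.List.pyGetD xs j d)
      = PySem.List.slice xs (some a) (some b) := by
  rw [PySem.List.slice_toNat xs h0 hb0]
  by_cases hab : b ≤ a
  · rw [PySem.List.pyRange_one_eq_nil hab]
    have hz : b.toNat - a.toNat = 0 := by omega
    simp [hz]
  · rw [not_le] at hab
    have hfull := PySem.List.map_pyGetD_pyRange' xs d h0
    rw [PySem.List.pyRange_one_append a b (xs.length : Int) (le_of_lt hab) hb,
        List.map_append] at hfull
    have hlen : ((PySem.List.pyRange a b).map (fun j => PySem.List.pyGetD xs j d)).length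
        = b.toNat - a.toNat := by
      simp [PySem.List.length_pyRange_one]; omega
    calc (PySem.List.pyRange a b).map (fun j => PySem.List.pyGetD xs j d)
        = (((PySem.List.pyRange a b).map (fun j => PySem.List.pyGetD xs j d)
            ++ (PySem.List.pyRange b (xs.length : Int)).map (fun j => PySem.List.pyGetD xs j d)).take
            (b.toNat - a.toNat)) := by rw [← hlen, List.take_left]
      _ = (List.drop a.toNat xs).take (b.toNat - a.toNat) := by rw [hfull]

theorem pv_crop_eq (board : List (List String)) (mi ma : Int)
    (hpre : Pre_get_smallest_board board)
    (h0 : 0 ≤ mi) (h1 : 0 ≤ ma) (h2 : ma ≤ (board.length : Int)) :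
    (PySem.List.pyRange mi ma).map (fun i =>
        (PySem.List.pyRange mi ma).map (fun j =>
          PySem.List.pyGetD (PySem.List.pyGetD board i []) j " "))
      = (PySem.List.slice board (some mi) (some ma)).map (fun row =>
          PySem.List.slice row (some mi) (some ma)) := by
  have hinner : ∀ i ∈ PySem.List.pyRange mi ma,
      (PySem.List.pyRange mi ma).map (fun j =>
          PySem.List.pyGetD (PySem.List.pyGetD board i []) j " ")
        = PySem.List.slice (PySem.List.pyGetD board i []) (some mi) (some ma) := by
    intro i hi
    obtain ⟨hi1, hi2⟩ := PySem.List.mem_pyRange_one.1 hi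
    have hrow : PySem.List.pyGetD board i [] ∈ board := by
      rw [PySem.List.pyGetD_eq_getElem _ _ (by omega) (by omega)]
      exact List.getElem_mem _
    exact pv_map_range_slice _ " " mi ma h0 h1
      (le_trans h2 (by exact_mod_cast hpre _ hrow))
  rw [List.map_congr_left hinner]
  have hmap : ∀ i ∈ PySem.List.pyRange mi ma,
      PySem.List.slice (PySem.List.pyGetD board i []) (some mi) (some ma)
        = PySem.List.pyGetD
            (board.map (fun row => PySem.List.slice row (some mi) (some ma))) i [] := by
    intro i hi
    have hnil : PySem.List.slice ([] : List String) (some mi) (some ma) = [] := by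
      rw [PySem.List.slice_toNat _ h0 h1]; simp
    have hm := PySem.List.pyGetD_map (fun row => PySem.List.slice row (some mi) (some ma))
      board i []
    rw [hnil] at hm
    exact hm.symm
  rw [List.map_congr_left hmap]
  rw [pv_map_range_slice _ [] mi ma h0 h1 (by simp; omega)]
  rw [PySem.List.slice_toNat _ h0 h1, PySem.List.slice_toNat _ h0 h1,
      List.map_take, List.map_drop]

theorem pv_revfind_nonneg (n : Int) (p : Int → Bool) :
    0 ≤ (((PySem.List.pyRange 0 n).reverse).find? p).getD 0 := by
  cases hf : ((PySem.List.pyRange 0 n).reverse).find? p with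
  | none => simp
  | some x =>
    have hm := List.mem_of_find?_eq_some hf
    rw [List.mem_reverse] at hm
    simpa using (PySem.List.mem_pyRange_one.1 hm).1

-- ===== VERDICT (by name: the statement is the Claim_ definition above) =====
theorem get_smallest_board_spec : Claim_equal_get_smallest_board := by
  intro board _ hpre
  unfold Spec_get_smallest_board get_smallest_board get_smallest_board_alt
  dsimp only
  rw [pv_state_eq board]
  dsimp only
  set n : Int := (board.length : Int) with hn
  set a := ((PySem.List.pyRange 0 n).find? (pvRowOcc board)).getD n with ha
  set b := (((PySem.List.pyRange 0 n).reverse).find? (pvRowOcc board)).getD 0 with hb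
  set c := ((PySem.List.pyRange 0 n).find? (pvColOcc board)).getD n with hc
  set d := (((PySem.List.pyRange 0 n).reverse).find? (pvColOcc board)).getD 0 with hd
  have hb0 : 0 ≤ b := hb ▸ pv_revfind_nonneg n (pvRowOcc board)
  have hd0 : 0 ≤ d := hd ▸ pv_revfind_nonneg n (pvColOcc board)
  rw [show (if c - 2 < 0 then (0:Int) else c - 2) = max (c - 2) 0 from by split_ifs <;> omega,
      show (if a - 2 < 0 then (0:Int) else a - 2) = max (a - 2) 0 from by split_ifs <;> omega,
      show (if b + 2 > n then n else b + 2) = min (b + 2) n from by split_ifs <;> omega,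
      show (if d + 2 > n then n else d + 2) = min (d + 2) n from by split_ifs <;> omega]
  refine Prod.ext ?_ rfl
  exact pv_crop_eq board _ _ hpre
    (le_min (le_max_right _ _) (le_max_right _ _))
    (le_trans (by omega) (le_max_left (min (d + 2) n) _))
    (by have h0n : (0:Int) ≤ n := hn ▸ by positivity
        omega)
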